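-- pv_equiv track=rewrite | github.com/sujoyksikdar/opra | compsocsite/allocation/utils.py | getEF1
-- ===== SOURCE A (Python) =====
-- def getEF1(pref1, allocated_items1, pref2, allocated_items2):
--     for i in range(len(allocated_items2)):
--         copy2 = allocated_items2.copy()
--         copy2.pop(i)
--         sum1 = sum(val for _, val in allocated_items1)
--         sum2 = sum(v2 for item1, _ in copy2 for item2, v2 in pref1 if item1 == item2)
--         if sum1 - sum2 >= 0:
--             return "EF1"
--     return "Not EF1"
-- ===== SOURCE B (Python) =====
-- def getEF1(pref1, allocated_items1, pref2, allocated_items2):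
--     if not allocated_items2:
--         return "Not EF1"
--     value = {}
--     for item, v in pref1:
--         value[item] = value.get(item, 0) + v
--     sum1 = sum(v for _, v in allocated_items1)
--     vals = [value.get(item, 0) for item, _ in allocated_items2]
--     total = sum(vals)
--     return "EF1" if sum1 - total + max(vals) >= 0 else "Not EF1"
-- ===== Notes on version B (the rewrite author's own statement) =====
-- stated objective: faster
-- what changed: Instead of re-summing agent 1's bundle and rescanning all of pref1 for every dropped index (O(m*n*p)), B builds a per-item value dictionary from pref1 once, computes the totals in one pass, and decides EF1 by comparing sum1 against total minus the maximum item value.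
import Mathlib
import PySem

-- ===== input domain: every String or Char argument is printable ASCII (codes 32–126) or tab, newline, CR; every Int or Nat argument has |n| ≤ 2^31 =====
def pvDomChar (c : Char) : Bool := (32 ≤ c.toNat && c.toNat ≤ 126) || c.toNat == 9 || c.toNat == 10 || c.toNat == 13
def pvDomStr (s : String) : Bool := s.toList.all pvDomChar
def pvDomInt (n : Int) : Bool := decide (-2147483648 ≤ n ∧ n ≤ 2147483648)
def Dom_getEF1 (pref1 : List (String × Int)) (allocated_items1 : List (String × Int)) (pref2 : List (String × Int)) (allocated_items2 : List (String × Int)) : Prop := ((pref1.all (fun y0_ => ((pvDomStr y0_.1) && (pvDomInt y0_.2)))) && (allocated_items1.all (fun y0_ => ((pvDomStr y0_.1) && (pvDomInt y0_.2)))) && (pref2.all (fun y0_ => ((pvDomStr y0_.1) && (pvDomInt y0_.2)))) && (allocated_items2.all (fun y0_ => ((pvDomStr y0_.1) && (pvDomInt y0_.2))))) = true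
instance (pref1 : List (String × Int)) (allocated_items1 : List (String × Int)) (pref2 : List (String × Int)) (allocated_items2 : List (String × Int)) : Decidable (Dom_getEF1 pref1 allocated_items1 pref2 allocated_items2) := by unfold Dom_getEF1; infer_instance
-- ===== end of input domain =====

-- B replaces A's per-index rescan of pref1 with a precomputed value dictionary and a max; objective: faster.
-- ===== PORT A =====
def getEF1_loopA (pref1 : List (String × Int)) (allocated_items1 : List (String × Int)) (allocated_items2 : List (String × Int)) : List Int → String
  | [] => "Not EF1"
  | i :: rest =>
    match PySem.List.pop? allocated_items2 i with
    | none => "Not EF1"  -- unreachable for i drawn from range(len(allocated_items2)); Python would raise IndexError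
    | some (_, copy2) =>
      let sum1 : Int := (allocated_items1.map (·.2)).sum
      let sum2 : Int := (copy2.flatMap (fun p1 => (pref1.filter (fun p2 => p1.1 == p2.1)).map (·.2))).sum
      if sum1 - sum2 ≥ 0 then "EF1"
      else getEF1_loopA pref1 allocated_items1 allocated_items2 rest

def getEF1 (pref1 : List (String × Int)) (allocated_items1 : List (String × Int)) (pref2 : List (String × Int)) (allocated_items2 : List (String × Int)) : String :=
  getEF1_loopA pref1 allocated_items1 allocated_items2 (PySem.List.pyRange 0 allocated_items2.length 1)


-- ===== PORT B =====
def getEF1_alt (pref1 : List (String × Int)) (allocated_items1 : List (String × Int)) (pref2 : List (String × Int)) (allocated_items2 : List (String × Int)) : String :=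
  if allocated_items2 = [] then "Not EF1"
  else
    let value := pref1.foldl (fun d p => d.insert p.1 (d.getD p.1 0 + p.2)) PySem.Dict.empty
    let sum1 : Int := (allocated_items1.map (·.2)).sum
    let vals := allocated_items2.map (fun p => value.getD p.1 0)
    let total := vals.sum
    match PySem.List.max? vals (fun x => x) with
    | none => "Not EF1"  -- unreachable: vals is nonempty
    | some m => if sum1 - total + m ≥ 0 then "EF1" else "Not EF1"


-- ===== PRECONDITION & SPEC =====
def Spec_getEF1 (pref1 : List (String × Int)) (allocated_items1 : List (String × Int)) (pref2 : List (String × Int)) (allocated_items2 : List (String × Int)) (out : String) : Prop := out = getEF1_alt pref1 allocated_items1 pref2 allocated_items2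
instance (pref1 : List (String × Int)) (allocated_items1 : List (String × Int)) (pref2 : List (String × Int)) (allocated_items2 : List (String × Int)) (out : String) : Decidable (Spec_getEF1 pref1 allocated_items1 pref2 allocated_items2 out) := by unfold Spec_getEF1; infer_instance

-- ===== CLAIM (what is proved, stated in full; the proofs are below) =====
def Claim_equal_getEF1 : Prop := ∀ (pref1 : List (String × Int)) (allocated_items1 : List (String × Int)) (pref2 : List (String × Int)) (allocated_items2 : List (String × Int)), Dom_getEF1 pref1 allocated_items1 pref2 allocated_items2 → Spec_getEF1 pref1 allocated_items1 pref2 allocated_items2 (getEF1 pref1 allocated_items1 pref2 allocated_items2)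

-- ===== LEMMAS AND PROOFS =====

-- value of item x for agent 1: the sum of ALL matching pref1 entries (duplicates count)
def pvVal (pref1 : List (String × Int)) (x : String) : Int :=
  ((pref1.filter (fun q => q.1 == x)).map (·.2)).sum

theorem pv_dict_getD (l : List (String × Int)) (d : PySem.Dict String Int) (k : String) :
    (l.foldl (fun d p => d.insert p.1 (d.getD p.1 0 + p.2)) d).getD k 0
      = d.getD k 0 + pvVal l k := by
  induction l generalizing d with
  | nil => simp [pvVal]
  | cons p t ih =>
    rw [List.foldl_cons, ih, PySem.Dict.getD_insert]
    simp only [pvVal, List.filter_cons]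
    by_cases h : p.1 = k
    · subst h
      simp only [beq_self_eq_true, if_pos trivial, List.map_cons, List.sum_cons]
      ring
    · rw [if_neg (fun e => h e.symm)]
      have hb : (p.1 == k) = false := by simp [h]
      simp [hb]

theorem sum2_eq (pref1 l : List (String × Int)) :
    (l.flatMap (fun p1 => (pref1.filter (fun p2 => p1.1 == p2.1)).map (·.2))).sum
      = (l.map (fun p => pvVal pref1 p.1)).sum := by
  induction l with
  | nil => simp
  | cons p t ih =>
    simp only [List.flatMap_cons, List.sum_append, ih, List.map_cons, List.sum_cons, pvVal]
    have hfe : List.filter (fun p2 : String × Int => p.1 == p2.1) pref1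
        = List.filter (fun q : String × Int => q.1 == p.1) pref1 := by
      apply List.filter_congr
      intro q _
      simp [eq_comm]
    rw [hfe]

theorem sum_map_eraseIdx (f : (String × Int) → Int) (xs : List (String × Int)) (k : Nat)
    (h : k < xs.length) :
    ((xs.eraseIdx k).map f).sum = (xs.map f).sum - f xs[k] := by
  have hsplit : (xs.map f).sum
      = ((xs.take k).map f).sum + f xs[k] + ((xs.drop (k + 1)).map f).sum := by
    conv_lhs => rw [← List.take_append_drop k xs]
    rw [← List.getElem_cons_drop (as := xs) (i := k) h]
    simp only [List.map_append, List.sum_append, List.map_cons, List.sum_cons]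
    ring
  rw [List.eraseIdx_eq_take_drop_succ, List.map_append, List.sum_append, hsplit]
  ring

theorem loopA_char (pref1 a1 a2 : List (String × Int)) (idxs : List Int)
    (h : ∀ i ∈ idxs, 0 ≤ i ∧ i < (a2.length : Int)) :
    getEF1_loopA pref1 a1 a2 idxs =
      if idxs.any (fun i => decide ((a1.map (·.2)).sum
          - ((a2.eraseIdx i.toNat).map (fun p => pvVal pref1 p.1)).sum ≥ 0))
      then "EF1" else "Not EF1" := by
  induction idxs with
  | nil => simp [getEF1_loopA]
  | cons i t ih =>
    obtain ⟨h0, hlt⟩ := h i List.mem_cons_self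
    have hn : i.toNat < a2.length := by omega
    have hp : PySem.List.pop? a2 i = some (a2[i.toNat], a2.eraseIdx i.toNat) := by
      have hc := PySem.List.pop?_natCast a2 i.toNat hn
      rwa [Int.toNat_of_nonneg h0] at hc
    simp only [getEF1_loopA, hp]
    rw [sum2_eq, ih (fun j hj => h j (List.mem_cons_of_mem _ hj)), List.any_cons]
    by_cases hc : (a1.map (·.2)).sum - ((a2.eraseIdx i.toNat).map (fun p => pvVal pref1 p.1)).sum ≥ 0
    · have hc' : ((a2.eraseIdx i.toNat).map (fun p => pvVal pref1 p.1)).sum ≤ (a1.map (·.2)).sum := by omega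
      simp [hc']
    · have hc' : ¬ ((a2.eraseIdx i.toNat).map (fun p => pvVal pref1 p.1)).sum ≤ (a1.map (·.2)).sum := by omega
      simp [hc']

-- ===== VERDICT (by name: the statement is the Claim_ definition above) =====
theorem getEF1_spec : Claim_equal_getEF1 := by
  intro pref1 a1 pref2 a2 _
  unfold Spec_getEF1 getEF1 getEF1_alt
  rcases ha2 : a2 with _ | ⟨x, rest⟩
  · simp [getEF1_loopA]
  rw [← ha2]
  have hne : a2 ≠ [] := by simp [ha2]
  rw [if_neg hne]
  have hvals : a2.map (fun p => (pref1.foldl (fun d p => d.insert p.1 (d.getD p.1 0 + p.2)) PySem.Dict.empty).getD p.1 0)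
      = a2.map (fun p => pvVal pref1 p.1) := by
    refine List.map_congr_left (fun p _ => ?_)
    rw [pv_dict_getD]
    simp
  simp only [hvals]
  set S : Int := (a1.map (·.2)).sum with hS
  set vals : List Int := a2.map (fun p => pvVal pref1 p.1) with hv
  have hvne : vals ≠ [] := by simp [hv, ha2]
  obtain ⟨m, hm⟩ : ∃ m, PySem.List.max? vals (fun x => x) = some m := by
    cases hmx : PySem.List.max? vals (fun x => x) with
    | none =>
      rw [PySem.List.max?_eq_none_iff] at hmx
      exact absurd hmx hvne
    | some m => exact ⟨m, rfl⟩
  have hmmem : m ∈ vals := PySem.List.max?_mem hm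
  have hmax : ∀ y ∈ vals, y ≤ m := fun y hy => PySem.List.max?_isMax hm y hy
  rw [hm]
  rw [loopA_char pref1 a1 a2 _ (fun i hi => by
    rw [PySem.List.mem_pyRange_one] at hi; exact hi)]
  show (if _ then _ else _) = (if S - vals.sum + m ≥ 0 then "EF1" else "Not EF1")
  by_cases hcond : S - vals.sum + m ≥ 0
  · rw [if_pos hcond, if_pos]
    rw [List.any_eq_true]
    obtain ⟨k, hk, hkm⟩ := List.mem_iff_getElem.mp hmmem
    have hk2 : k < a2.length := by
      have := hk
      rwa [hv, List.length_map] at this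
    refine ⟨(k : Int), ?_, ?_⟩
    · rw [PySem.List.mem_pyRange_one]
      constructor <;> omega
    · simp only [Int.toNat_natCast, decide_eq_true_eq]
      rw [sum_map_eraseIdx _ _ _ hk2]
      have hvk : pvVal pref1 (a2[k].1) = m := by
        rw [← hkm]
        simp [hv]
      rw [hvk, ← hv]
      omega
  · rw [if_neg hcond, if_neg]
    rw [List.any_eq_true]
    rintro ⟨i, hi, hP⟩
    rw [PySem.List.mem_pyRange_one] at hi
    have hin : i.toNat < a2.length := by omega
    simp only [decide_eq_true_eq] at hP
    rw [sum_map_eraseIdx _ _ _ hin, ← hv] at hP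
    have hle : pvVal pref1 (a2[i.toNat]).1 ≤ m := by
      apply hmax
      rw [hv]
      exact List.mem_map.mpr ⟨a2[i.toNat], List.getElem_mem _, rfl⟩
    omega
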